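-- pv_equiv track=rewrite | github.com/elice-02-study-01-algorithm/python | JH_Park/season2/programmers/3차 문제집_2번.py | solution
-- ===== SOURCE A (Python) =====
-- def solution(ingredient):
--     answer = 0
--     burger = []
--     for ele in ingredient:
--         burger.append(ele)
--         if burger[-4:] == [1, 2, 3, 1]:
--             answer += 1
--             for _ in range(4):
--                 burger.pop()
--     return answer
-- ===== SOURCE B (Python) =====
-- def solution(ingredient):
--     # Repeatedly delete the leftmost [1, 2, 3, 1] window from the list, rescanning
--     # from the start after each deletion; count the deletions.
--     s = list(ingredient)
--     answer = 0
--     while True: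
--         found = -1
--         i = 0
--         while i + 4 <= len(s):
--             if s[i:i + 4] == [1, 2, 3, 1]:
--                 found = i
--                 break
--             i += 1
--         if found < 0:
--             return answer
--         s = s[:found] + s[found + 4:]
--         answer += 1
-- ===== Notes on version B (the rewrite author's own statement) =====
-- stated objective: alternative
-- what changed: Replaced the single-pass stack (push each element, pop four when the top four are [1,2,3,1]) by repeated left-to-right rescans of a shrinking list that each time delete the leftmost [1,2,3,1] window and count it.
import Mathlib
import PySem

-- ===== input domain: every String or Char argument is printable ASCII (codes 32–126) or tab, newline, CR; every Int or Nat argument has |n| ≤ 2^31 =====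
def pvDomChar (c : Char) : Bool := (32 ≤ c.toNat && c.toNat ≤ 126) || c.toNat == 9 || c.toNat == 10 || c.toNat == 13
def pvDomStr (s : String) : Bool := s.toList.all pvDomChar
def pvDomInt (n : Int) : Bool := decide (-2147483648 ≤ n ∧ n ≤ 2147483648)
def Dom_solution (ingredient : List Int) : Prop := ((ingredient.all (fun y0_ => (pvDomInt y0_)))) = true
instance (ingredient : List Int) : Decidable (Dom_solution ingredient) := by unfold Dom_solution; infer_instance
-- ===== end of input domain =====

-- B replaces A's single-pass stack by repeated rescans deleting the leftmost [1,2,3,1] window (alternative algorithm, not faster).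


-- ===== PORT A =====
-- loop body of A's for-loop: append, then if burger[-4:] == [1,2,3,1] pop four and count.
-- burger.pop() is ported as dropLast: pop is only executed when burger has ≥ 4 elements
-- (the guard just matched a length-4 suffix), where Python's pop() is exactly dropLast.
def stepA (st : Int × List Int) (ele : Int) : Int × List Int :=
  let burger := st.2 ++ [ele]
  if PySem.List.slice burger (some (-4)) none = [1, 2, 3, 1] then
    (st.1 + 1, (PySem.List.pyRange 0 4 1).foldl (fun b _ => b.dropLast) burger)
  else
    (st.1, burger)

def solution (ingredient : List Int) : Int :=
  (ingredient.foldl stepA ((0 : Int), ([] : List Int))).1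

-- ===== PORT B =====
-- inner while-loop of Source B: first index i with s[i:i+4] == [1,2,3,1] (none = scan fell off,
-- i.e. found = -1).  Source B stops the scan at i + 4 > len(s); scanning the shorter suffixes too
-- is identical since a list of length < 4 never equals the length-4 pattern.
def findPat : List Int → Nat → Option Nat
  | x :: rest, i => if (x :: rest).take 4 = [1, 2, 3, 1] then some i else findPat rest (i + 1)
  | [], _ => none

-- a list whose first four elements are the pattern has at least four elements
theorem len_ge4 (l : List Int) (h : l.take 4 = [1, 2, 3, 1]) : 4 ≤ l.length := by
  have hlen : (l.take 4).length = 4 := by rw [h]; rfl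
  rw [List.length_take] at hlen
  omega

-- bound used by the outer loop's termination (the deleted window lies inside the list)
theorem findPat_bound : ∀ (s : List Int) (i j : Nat), findPat s i = some j → j - i + 4 ≤ s.length := by
  intro s
  induction s with
  | nil => intro i j h; simp [findPat] at h
  | cons x rest ih =>
    intro i j h
    simp only [findPat] at h
    split at h
    · rename_i hc
      cases h
      have := len_ge4 _ hc
      omega
    · have := ih (i + 1) j h
      simp only [List.length_cons]
      omega

-- outer while-loop of Source B: state (answer, s); delete the leftmost window, count, repeat.
def solBLoop (answer : Int) (s : List Int) : Int :=
  match h : findPat s 0 with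
  | none => answer
  | some i => solBLoop (answer + 1) (s.take i ++ s.drop (i + 4))
termination_by s.length
decreasing_by
  have := findPat_bound s 0 i h
  simp only [List.length_append, List.length_take, List.length_drop]
  omega

def solution_alt (ingredient : List Int) : Int :=
  solBLoop 0 ingredient

-- ===== PRECONDITION & SPEC =====
def Spec_solution (ingredient : List Int) (out : Int) : Prop := out = solution_alt ingredient
instance (ingredient : List Int) (out : Int) : Decidable (Spec_solution ingredient out) := by unfold Spec_solution; infer_instance

-- ===== CLAIM (what is proved, stated in full; the proofs are below) =====
def Claim_equal_solution : Prop := ∀ (ingredient : List Int), Dom_solution ingredient → Spec_solution ingredient (solution ingredient)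

-- ===== LEMMAS AND PROOFS =====

-- equation lemmas for solBLoop
theorem solBLoop_none (a : Int) (s : List Int) (hn : findPat s 0 = none) : solBLoop a s = a := by
  rw [solBLoop]
  split
  · rfl
  · rename_i i h'; rw [hn] at h'; cases h'

theorem solBLoop_some (a : Int) (s : List Int) (j : Nat) (h : findPat s 0 = some j) :
    solBLoop a s = solBLoop (a + 1) (s.take j ++ s.drop (j + 4)) := by
  rw [solBLoop]
  split
  · rename_i h'; rw [h] at h'; cases h'
  · rename_i i h'; rw [h] at h'; cases h'; rfl

-- "s contains no [1,2,3,1] window"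
def noOcc (s : List Int) : Prop := ∀ k : Nat, (s.drop k).take 4 ≠ [1, 2, 3, 1]

theorem findPat_none (s : List Int) (i : Nat) (hnone : findPat s i = none) : noOcc s := by
  induction s generalizing i with
  | nil => intro k; simp
  | cons x rest ih =>
    simp only [findPat] at hnone
    split at hnone
    · exact absurd hnone (by simp)
    · intro k
      cases k with
      | zero => simpa using ‹¬ (x :: rest).take 4 = [1, 2, 3, 1]›
      | succ k => exact (ih (i + 1) hnone) k

theorem findPat_some (s : List Int) (j : Nat) (h : findPat s 0 = some j) :
    j + 4 ≤ s.length ∧ (s.drop j).take 4 = [1, 2, 3, 1] ∧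
      ∀ k < j, (s.drop k).take 4 ≠ [1, 2, 3, 1] := by
  suffices H : ∀ (s : List Int) (i j : Nat), findPat s i = some j →
      i ≤ j ∧ j - i + 4 ≤ s.length ∧ (s.drop (j - i)).take 4 = [1, 2, 3, 1] ∧
        ∀ k < j - i, (s.drop k).take 4 ≠ [1, 2, 3, 1] by
    have := H s 0 j h
    simpa using this
  intro s
  induction s with
  | nil => intro i j h; simp [findPat] at h
  | cons x rest ih =>
    intro i j h
    simp only [findPat] at h
    split at h
    · rename_i hc
      cases h
      have := len_ge4 _ hc
      exact ⟨le_refl _, by omega, by simpa using hc, by omega⟩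
    · rename_i hc
      obtain ⟨h1, h2, h3, h4⟩ := ih (i + 1) j h
      refine ⟨by omega, by simp only [List.length_cons]; omega, ?_, ?_⟩
      · have hji : j - i = (j - (i + 1)) + 1 := by omega
        rw [hji]
        simpa using h3
      · intro k hk
        cases k with
        | zero => simpa using hc
        | succ k =>
          have : k < j - (i + 1) := by omega
          simpa using h4 k this

-- a window inside a prefix is a window of the whole list
theorem noOcc_take (s : List Int) (j m : Nat) (hm : m ≤ j + 3)
    (hmin : ∀ k < j, (s.drop k).take 4 ≠ [1, 2, 3, 1]) : noOcc (s.take m) := by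
  intro k hk
  have h4 := len_ge4 _ hk
  rw [List.length_drop, List.length_take] at h4
  have hk4 : k + 4 ≤ m := by omega
  rw [List.drop_take, List.take_take] at hk
  have hmin4 : min 4 (m - k) = 4 := by omega
  rw [hmin4] at hk
  exact hmin k (by omega) hk

-- A's step on a state with no fire: it just appends
theorem stepA_no_fire (a : Int) (b : List Int) (x : Int) (h : noOcc (b ++ [x])) :
    stepA (a, b) x = (a, b ++ [x]) := by
  have hcond : ¬ (PySem.List.slice (b ++ [x]) (some (-4)) none = [1, 2, 3, 1]) := by
    rw [PySem.List.slice_from_neg_ofNat (b ++ [x]) 4 (by omega)]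
    intro hc
    have h4 : ((b ++ [x]).drop ((b ++ [x]).length - 4)).length = 4 := by rw [hc]; rfl
    rw [List.length_drop] at h4
    apply h ((b ++ [x]).length - 4)
    rw [List.take_of_length_le (by rw [List.length_drop]; omega)]
    exact hc
  simp [stepA, hcond]

-- folding A's step over a window-free list never fires
theorem foldA_noOcc (s : List Int) (h : noOcc s) (a : Int) :
    List.foldl stepA (a, ([] : List Int)) s = (a, s) := by
  induction s using List.reverseRecOn with
  | nil => rfl
  | append_singleton t x ih =>
    have ht : noOcc t := by
      intro k hk
      have h4 := len_ge4 _ hk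
      have hk4 : 4 ≤ t.length - k := by rwa [List.length_drop] at h4
      apply h k
      rw [List.drop_append_of_le_length (by omega), List.take_append_of_le_length h4]
      exact hk
    rw [List.foldl_append, ih ht]
    exact stepA_no_fire a t x h

-- four pops after a fire peel off exactly the matched window
theorem dropLast_four (w : List Int) (p q r t : Int) :
    ((((w ++ [p, q, r, t]).dropLast).dropLast).dropLast).dropLast = w := by
  have h1 : w ++ [p, q, r, t] = (w ++ [p, q, r]) ++ [t] := by simp
  have h2 : w ++ [p, q, r] = (w ++ [p, q]) ++ [r] := by simp
  have h3 : w ++ [p, q] = (w ++ [p]) ++ [q] := by simp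
  rw [h1, List.dropLast_concat, h2, List.dropLast_concat, h3, List.dropLast_concat,
      List.dropLast_concat]

-- A's step fires when the new burger ends in the pattern: pops back to the part before it
theorem stepA_fire (a : Int) (p : List Int) (x : Int) (w : List Int)
    (hx : p ++ [x] = w ++ [1, 2, 3, 1]) :
    stepA (a, p) x = (a + 1, w) := by
  have hcond : PySem.List.slice (w ++ [1, 2, 3, 1]) (some (-4)) none = [1, 2, 3, 1] := by
    rw [PySem.List.slice_from_neg_ofNat _ 4 (by omega)]
    have hl : (w ++ [1, 2, 3, 1]).length - 4 = w.length := by simp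
    rw [hl]
    simp
  have hpy : PySem.List.pyRange 0 4 1 = [0, 1, 2, 3] := by decide
  simp only [stepA, hx]
  rw [if_pos hcond]
  simp only [hpy, List.foldl_cons, List.foldl_nil]
  rw [dropLast_four]

-- main induction: A's fold equals B's deletion loop, for any starting answer
theorem main_lemma : ∀ (n : Nat) (a : Int) (s : List Int), s.length ≤ n →
    (List.foldl stepA (a, ([] : List Int)) s).1 = solBLoop a s := by
  intro n
  induction n with
  | zero =>
    intro a s hs
    have hnil : s = [] := List.eq_nil_of_length_eq_zero (by omega)
    subst hnil
    rw [solBLoop_none a [] (by rfl)]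
    rfl
  | succ n ih =>
    intro a s hs
    cases h : findPat s 0 with
    | none =>
      rw [solBLoop_none a s h, foldA_noOcc s (findPat_none s 0 h) a]
    | some j =>
      obtain ⟨hj, hocc, hmin⟩ := findPat_some s j h
      have h34 : j + 3 < s.length := by omega
      -- the new burger right before the fire: take (j+4) s, in two decompositions
      have hx : s.take (j + 3) ++ [s[j + 3]] = s.take (j + 4) := by
        have h41 : (j : Nat) + 4 = (j + 3) + 1 := by omega
        rw [h41]
        conv_rhs => rw [List.take_add_one, List.getElem?_eq_getElem h34]
        rfl
      have hw : s.take (j + 4) = s.take j ++ [1, 2, 3, 1] := by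
        rw [List.take_add, hocc]
      have hsplit : s = (s.take (j + 3) ++ [s[j + 3]]) ++ s.drop (j + 4) := by
        rw [hx, List.take_append_drop]
      have hnoU : noOcc (s.take (j + 3)) := noOcc_take s j (j + 3) (by omega) hmin
      have hnoJ : noOcc (s.take j) := noOcc_take s j j (by omega) hmin
      calc (List.foldl stepA (a, ([] : List Int)) s).1
          = (List.foldl stepA (stepA (a, s.take (j + 3)) s[j + 3]) (s.drop (j + 4))).1 := by
            conv_lhs => rw [hsplit]
            rw [List.foldl_append, List.foldl_append, foldA_noOcc _ hnoU a]
            rfl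
        _ = (List.foldl stepA (a + 1, s.take j) (s.drop (j + 4))).1 := by
            rw [stepA_fire a _ _ _ (hx.trans hw)]
        _ = (List.foldl stepA (a + 1, ([] : List Int)) (s.take j ++ s.drop (j + 4))).1 := by
            rw [List.foldl_append, foldA_noOcc _ hnoJ (a + 1)]
        _ = solBLoop (a + 1) (s.take j ++ s.drop (j + 4)) := by
            apply ih
            rw [List.length_append, List.length_take, List.length_drop]
            omega
        _ = solBLoop a s := (solBLoop_some a s j h).symm

-- ===== VERDICT (by name: the statement is the Claim_ definition above) =====
theorem solution_spec : Claim_equal_solution := by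
  intro ingredient _
  unfold Spec_solution solution solution_alt
  exact main_lemma ingredient.length 0 ingredient (le_refl _)
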